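-- pv_equiv track=rewrite | github.com/aqillakhani/platinum | src/platinum/sources/gutenberg.py | _pick_text_url
-- ===== SOURCE A (Python) =====
-- def _pick_text_url(formats: dict[str, str]) -> str | None:
--     """Pick the best plain-text format URL from a Gutendex ``formats`` map."""
--     for mime in (
--         "text/plain; charset=utf-8",
--         "text/plain; charset=us-ascii",
--         "text/plain",
--     ):
--         if mime in formats:
--             return formats[mime]
--     for mime, url in formats.items():
--         if mime.startswith("text/plain"):
--             return url
--     return None
-- ===== SOURCE B (Python) =====
-- def _pick_text_url(formats: dict[str, str]) -> str | None:
--     """Single ranked pass: 0/1/2 for the exact preferred mimes, 3 for any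
--     other text/plain* key; keep the lowest rank seen (first wins on ties)."""
--     best_rank = None
--     best_url = None
--     for mime, url in formats.items():
--         if mime == "text/plain; charset=utf-8":
--             rank = 0
--         elif mime == "text/plain; charset=us-ascii":
--             rank = 1
--         elif mime == "text/plain":
--             rank = 2
--         elif mime.startswith("text/plain"):
--             rank = 3
--         else:
--             continue
--         if best_rank is None or rank < best_rank:
--             best_rank = rank
--             best_url = url
--     return best_url
-- ===== Notes on version B (the rewrite author's own statement) =====
-- stated objective: alternative
-- what changed: A's two differently-shaped scans (three exact-key membership lookups in preference order, then a startswith fallback scan) are replaced by a single pass over formats.items() that ranks each key (0/1/2 for the exact preferred mimes, 3 for other text/plain* keys) and keeps the lowest rank seen, updating only on strictly smaller rank so the first match per rank wins.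
import Mathlib
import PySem

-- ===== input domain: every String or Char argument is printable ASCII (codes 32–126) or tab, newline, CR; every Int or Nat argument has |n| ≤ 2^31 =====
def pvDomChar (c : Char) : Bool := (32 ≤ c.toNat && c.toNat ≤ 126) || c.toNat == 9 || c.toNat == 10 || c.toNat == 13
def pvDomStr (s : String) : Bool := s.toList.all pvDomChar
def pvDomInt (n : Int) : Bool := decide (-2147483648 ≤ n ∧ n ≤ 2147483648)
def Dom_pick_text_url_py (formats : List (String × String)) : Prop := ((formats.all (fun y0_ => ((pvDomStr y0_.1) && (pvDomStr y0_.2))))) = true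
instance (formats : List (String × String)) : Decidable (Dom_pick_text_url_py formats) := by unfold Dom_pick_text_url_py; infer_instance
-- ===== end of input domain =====

-- B replaces A's two differently-shaped scans (three exact-key lookups, then a
-- startswith scan) by ONE ranked pass keeping the lowest-rank match; alternative
-- decomposition of the same task.

-- ===== PORT A =====
-- dict membership + lookup = first match in the association list
def pvLookupA (formats : List (String × String)) (mime : String) : Option String :=
  (formats.find? (fun kv => kv.1 == mime)).map (·.2)

-- A's first loop: over the tuple of three preferred mimes, early return
def pvFirstPref (formats : List (String × String)) : List String → Option String
  | [] => none
  | m :: ms =>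
    match pvLookupA formats m with
    | some u => some u
    | none => pvFirstPref formats ms

-- A's second loop: first key starting with "text/plain", early return
def pvScanStartswith : List (String × String) → Option String
  | [] => none
  | (mime, url) :: rest =>
    if PySem.Str.startswith mime "text/plain" then some url
    else pvScanStartswith rest

def pick_text_url_py (formats : List (String × String)) : Option String :=
  match pvFirstPref formats
      ["text/plain; charset=utf-8", "text/plain; charset=us-ascii", "text/plain"] with
  | some u => some u
  | none => pvScanStartswith formats

-- ===== PORT B =====
def pvRank (mime : String) : Option Nat :=
  if mime == "text/plain; charset=utf-8" then some 0
  else if mime == "text/plain; charset=us-ascii" then some 1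
  else if mime == "text/plain" then some 2
  else if PySem.Str.startswith mime "text/plain" then some 3
  else none

-- one loop step: update (best_rank, best_url) only on a strictly smaller rank
def pvStep (best : Option (Nat × String)) (kv : String × String) : Option (Nat × String) :=
  match pvRank kv.1 with
  | none => best
  | some r =>
    match best with
    | none => some (r, kv.2)
    | some (br, _) => if r < br then some (r, kv.2) else best

def pick_text_url_py_alt (formats : List (String × String)) : Option String :=
  (formats.foldl pvStep none).map (·.2)

-- ===== PRECONDITION & SPEC =====
def Spec_pick_text_url_py (formats : List (String × String)) (out : Option String) : Prop := out = pick_text_url_py_alt formats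
instance (formats : List (String × String)) (out : Option String) : Decidable (Spec_pick_text_url_py formats out) := by unfold Spec_pick_text_url_py; infer_instance

-- ===== CLAIM (what is proved, stated in full; the proofs are below) =====
def Claim_equal_pick_text_url_py : Prop := ∀ (formats : List (String × String)), Dom_pick_text_url_py formats → Spec_pick_text_url_py formats (pick_text_url_py formats)

-- ===== LEMMAS AND PROOFS =====

-- left-biased minimum-by-rank combination of two loop states
def pvComb : Option (Nat × String) → Option (Nat × String) → Option (Nat × String)
  | none, c => c
  | some p, none => some p
  | some p, some q => if q.1 < p.1 then some q else some p

theorem pvStep_eq (b : Option (Nat × String)) (x : String × String) :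
    pvStep b x = pvComb b ((pvRank x.1).map (fun r => (r, x.2))) := by
  cases h : pvRank x.1 <;> cases b <;> simp [pvStep, pvComb, h]

theorem pvComb_assoc (a b c : Option (Nat × String)) :
    pvComb (pvComb a b) c = pvComb a (pvComb b c) := by
  rcases a with _ | ⟨p1, p2⟩
  · rfl
  rcases b with _ | ⟨q1, q2⟩
  · rfl
  rcases c with _ | ⟨r1, r2⟩
  · simp only [pvComb]; split_ifs <;> rfl
  by_cases h1 : q1 < p1 <;> by_cases h2 : r1 < q1 <;>
    simp only [pvComb, h1, h2, if_true, if_false] <;>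
    split_ifs <;> first | rfl | omega

theorem pvLoop_shift (l : List (String × String)) (b : Option (Nat × String)) :
    l.foldl pvStep b = pvComb b (l.foldl pvStep none) := by
  induction l generalizing b with
  | nil => cases b <;> simp [pvComb]
  | cons x l ih =>
    simp only [List.foldl_cons]
    rw [ih (pvStep b x), ih (pvStep none x), pvStep_eq, pvStep_eq]
    have h : pvComb none ((pvRank x.1).map fun r => (r, x.2)) =
        ((pvRank x.1).map fun r => (r, x.2)) := by cases pvRank x.1 <;> rfl
    rw [h, ← pvComb_assoc]

-- canonical description of the loop's final state
def pvBestSpec (l : List (String × String)) : Option (Nat × String) :=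
  match l.find? (fun kv => kv.1 == "text/plain; charset=utf-8") with
  | some kv => some (0, kv.2)
  | none =>
    match l.find? (fun kv => kv.1 == "text/plain; charset=us-ascii") with
    | some kv => some (1, kv.2)
    | none =>
      match l.find? (fun kv => kv.1 == "text/plain") with
      | some kv => some (2, kv.2)
      | none =>
        match l.find? (fun kv => pvRank kv.1 == some 3) with
        | some kv => some (3, kv.2)
        | none => none

theorem pvLoop_eq_bestSpec (l : List (String × String)) :
    l.foldl pvStep none = pvBestSpec l := by
  induction l with
  | nil => rfl
  | cons x l ih =>
    obtain ⟨k, u⟩ := x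
    simp only [List.foldl_cons]
    rw [pvLoop_shift, ih, pvStep_eq]
    by_cases h0 : k = "text/plain; charset=utf-8"
    · subst h0
      have hr : pvRank "text/plain; charset=utf-8" = some 0 := by simp [pvRank]
      conv_rhs => unfold pvBestSpec
      rw [List.find?_cons_of_pos (by simp)]
      rcases hS : pvBestSpec l with _ | ⟨r, v⟩ <;> simp [pvComb, hr]
    · by_cases h1 : k = "text/plain; charset=us-ascii"
      · subst h1
        have hr : pvRank "text/plain; charset=us-ascii" = some 1 := by simp [pvRank]
        conv_rhs => unfold pvBestSpec
        rw [List.find?_cons_of_neg (by simp),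
            List.find?_cons_of_pos (by simp)]
        rcases hf0 : l.find? (fun kv => kv.1 == "text/plain; charset=utf-8") with _ | kv0 <;>
          rcases hf1 : l.find? (fun kv => kv.1 == "text/plain; charset=us-ascii") with _ | kv1 <;>
          rcases hf2 : l.find? (fun kv => kv.1 == "text/plain") with _ | kv2 <;>
          rcases hf3 : l.find? (fun kv => pvRank kv.1 == some 3) with _ | kv3 <;>
          simp [pvBestSpec, pvComb, hr, hf0, hf1, hf2, hf3]
      · by_cases h2 : k = "text/plain"
        · subst h2
          have hr : pvRank "text/plain" = some 2 := by simp [pvRank]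
          conv_rhs => unfold pvBestSpec
          rw [List.find?_cons_of_neg (by simp),
              List.find?_cons_of_neg (by simp),
              List.find?_cons_of_pos (by simp)]
          rcases hf0 : l.find? (fun kv => kv.1 == "text/plain; charset=utf-8") with _ | kv0 <;>
            rcases hf1 : l.find? (fun kv => kv.1 == "text/plain; charset=us-ascii") with _ | kv1 <;>
            rcases hf2 : l.find? (fun kv => kv.1 == "text/plain") with _ | kv2 <;>
            rcases hf3 : l.find? (fun kv => pvRank kv.1 == some 3) with _ | kv3 <;>
            simp [pvBestSpec, pvComb, hr, hf0, hf1, hf2, hf3]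
        · by_cases h3 : PySem.Str.startswith k "text/plain" = true
          · have hr : pvRank k = some 3 := by
              unfold pvRank
              rw [if_neg (by simp [h0]), if_neg (by simp [h1]), if_neg (by simp [h2]), if_pos h3]
            conv_rhs => unfold pvBestSpec
            rw [List.find?_cons_of_neg (by simp [h0]),
                List.find?_cons_of_neg (by simp [h1]),
                List.find?_cons_of_neg (by simp [h2]),
                List.find?_cons_of_pos (by simp [hr])]
            rcases hf0 : l.find? (fun kv => kv.1 == "text/plain; charset=utf-8") with _ | kv0 <;>
              rcases hf1 : l.find? (fun kv => kv.1 == "text/plain; charset=us-ascii") with _ | kv1 <;>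
              rcases hf2 : l.find? (fun kv => kv.1 == "text/plain") with _ | kv2 <;>
              rcases hf3 : l.find? (fun kv => pvRank kv.1 == some 3) with _ | kv3 <;>
              simp [pvBestSpec, pvComb, hr, hf0, hf1, hf2, hf3]
          · have hr : pvRank k = none := by
              unfold pvRank
              rw [if_neg (by simp [h0]), if_neg (by simp [h1]), if_neg (by simp [h2]), if_neg h3]
            conv_rhs => unfold pvBestSpec
            rw [List.find?_cons_of_neg (by simp [h0]),
                List.find?_cons_of_neg (by simp [h1]),
                List.find?_cons_of_neg (by simp [h2]),
                List.find?_cons_of_neg (by simp [hr])]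
            rw [hr]
            rcases hf0 : l.find? (fun kv => kv.1 == "text/plain; charset=utf-8") with _ | kv0 <;>
              rcases hf1 : l.find? (fun kv => kv.1 == "text/plain; charset=us-ascii") with _ | kv1 <;>
              rcases hf2 : l.find? (fun kv => kv.1 == "text/plain") with _ | kv2 <;>
              rcases hf3 : l.find? (fun kv => pvRank kv.1 == some 3) with _ | kv3 <;>
              simp [pvBestSpec, pvComb, hf0, hf1, hf2, hf3]

-- when no exact preferred key occurs, A's startswith scan finds exactly the first rank-3 key
theorem pvScan_eq_find3 (l : List (String × String))
    (g0 : l.find? (fun kv => kv.1 == "text/plain; charset=utf-8") = none)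
    (g1 : l.find? (fun kv => kv.1 == "text/plain; charset=us-ascii") = none)
    (g2 : l.find? (fun kv => kv.1 == "text/plain") = none) :
    pvScanStartswith l = (l.find? (fun kv => pvRank kv.1 == some 3)).map (·.2) := by
  induction l with
  | nil => rfl
  | cons x l ih =>
    obtain ⟨k, u⟩ := x
    by_cases e0 : k = "text/plain; charset=utf-8"
    · rw [List.find?_cons_of_pos (by simp [e0])] at g0; exact absurd g0 (by simp)
    rw [List.find?_cons_of_neg (by simp [e0])] at g0
    by_cases e1 : k = "text/plain; charset=us-ascii"
    · rw [List.find?_cons_of_pos (by simp [e1])] at g1; exact absurd g1 (by simp)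
    rw [List.find?_cons_of_neg (by simp [e1])] at g1
    by_cases e2 : k = "text/plain"
    · rw [List.find?_cons_of_pos (by simp [e2])] at g2; exact absurd g2 (by simp)
    rw [List.find?_cons_of_neg (by simp [e2])] at g2
    by_cases h3 : PySem.Str.startswith k "text/plain" = true
    · have hr : pvRank k = some 3 := by
        unfold pvRank
        rw [if_neg (by simp [e0]), if_neg (by simp [e1]), if_neg (by simp [e2]), if_pos h3]
      rw [List.find?_cons_of_pos (by simp [hr])]
      simp only [pvScanStartswith]
      rw [if_pos h3]
      rfl
    · have hr : pvRank k = none := by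
        unfold pvRank
        rw [if_neg (by simp [e0]), if_neg (by simp [e1]), if_neg (by simp [e2]), if_neg h3]
      rw [List.find?_cons_of_neg (by simp [hr])]
      simp only [pvScanStartswith, h3, Bool.false_eq_true, if_false]
      exact ih g0 g1 g2

theorem pvA_eq_bestSpec (l : List (String × String)) :
    pick_text_url_py l = (pvBestSpec l).map (·.2) := by
  rcases hf0 : l.find? (fun kv => kv.1 == "text/plain; charset=utf-8") with _ | kv0 <;>
    rcases hf1 : l.find? (fun kv => kv.1 == "text/plain; charset=us-ascii") with _ | kv1 <;>
    rcases hf2 : l.find? (fun kv => kv.1 == "text/plain") with _ | kv2 <;>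
    simp [pick_text_url_py, pvFirstPref, pvLookupA, pvBestSpec, hf0, hf1, hf2]
  rw [pvScan_eq_find3 l hf0 hf1 hf2]
  rcases hf3 : l.find? (fun kv => pvRank kv.1 == some 3) with _ | kv3 <;> simp [hf3]

-- ===== VERDICT (by name: the statement is the Claim_ definition above) =====
theorem pick_text_url_py_spec : Claim_equal_pick_text_url_py := by
  intro formats _
  unfold Spec_pick_text_url_py pick_text_url_py_alt
  rw [pvLoop_eq_bestSpec, pvA_eq_bestSpec]
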